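-- pv_equiv track=rewrite | github.com/solid-stats/replay-parser-2 | scripts/compare-year-edge-sample.py | strip_legacy_tag
-- ===== SOURCE A (Python) =====
-- def strip_legacy_tag(raw_name: str) -> str:
--     result = []
--     in_tag = False
--     for char in raw_name.strip():
--         if char == "[":
--             in_tag = True
--             continue
--         if char == "]" and in_tag:
--             in_tag = False
--             continue
--         if not in_tag:
--             result.append(char)
--     return "".join(result).strip()
-- ===== SOURCE B (Python) =====
-- def strip_legacy_tag(raw_name: str) -> str:
--     parts = raw_name.strip().split("[")
--     pieces = [parts[0]] + [p.split("]", 1)[1] if "]" in p else "" for p in parts[1:]]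
--     return "".join(pieces).strip()
-- ===== Notes on version B (the rewrite author's own statement) =====
-- stated objective: faster
-- what changed: Replaces A's char-by-char state-machine loop (an in_tag flag, appending kept characters one by one) by a split-based pipeline: split the stripped string on the opening bracket, keep the first part whole, and from every later segment keep only what follows its first closing bracket (nothing if it has none), then join and strip.
import Mathlib
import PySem

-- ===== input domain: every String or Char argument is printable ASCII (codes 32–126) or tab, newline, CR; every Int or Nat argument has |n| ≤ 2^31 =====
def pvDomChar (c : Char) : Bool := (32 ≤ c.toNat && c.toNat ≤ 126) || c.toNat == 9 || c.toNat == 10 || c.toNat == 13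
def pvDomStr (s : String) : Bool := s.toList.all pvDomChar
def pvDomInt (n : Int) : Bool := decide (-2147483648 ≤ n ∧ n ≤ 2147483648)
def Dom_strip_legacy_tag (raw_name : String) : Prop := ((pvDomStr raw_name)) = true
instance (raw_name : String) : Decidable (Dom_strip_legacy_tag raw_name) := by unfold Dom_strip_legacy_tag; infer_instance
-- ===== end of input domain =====

-- B replaces A's char-by-char in_tag state machine by split-on-opening-bracket plus drop-through-first-closing-bracket per segment (measured faster by a constant factor: bulk str.split/join instead of a per-char Python loop).

-- ===== PORT A =====
-- literal transliteration of A's loop: state (result, in_tag), branches in A's order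
def stripLegacyStep (acc : List Char × Bool) (c : Char) : List Char × Bool :=
  if c = '[' then (acc.1, true)
  else if c = ']' && acc.2 then (acc.1, false)
  else if !acc.2 then (acc.1 ++ [c], acc.2)
  else acc

def strip_legacy_tag (raw_name : String) : String :=
  let st := (PySem.Str.strip raw_name).toList.foldl stripLegacyStep ([], false)
  PySem.Str.strip (PySem.Str.join "" (st.1.map (fun c => String.ofList [c])))

-- ===== PORT B =====
-- transliteration of Source B: parts = s.split("["); pieces = parts[0] :: [p.split("]",1)[1] if "]" in p else "" for p in parts[1:]]; "".join(pieces).strip()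
def strip_legacy_tag_alt (raw_name : String) : String :=
  let parts := (PySem.Str.split? (PySem.Str.strip raw_name) "[").getD []
  let pieces := parts.headD "" ::
    parts.tail.map (fun p =>
      if PySem.Str.isIn "]" p then ((PySem.Str.splitMax? p "]" 1).getD []).getD 1 "" else "")
  PySem.Str.strip (PySem.Str.join "" pieces)

-- ===== PRECONDITION & SPEC =====
def Spec_strip_legacy_tag (raw_name : String) (out : String) : Prop := out = strip_legacy_tag_alt raw_name
instance (raw_name : String) (out : String) : Decidable (Spec_strip_legacy_tag raw_name out) := by unfold Spec_strip_legacy_tag; infer_instance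

-- ===== CLAIM (what is proved, stated in full; the proofs are below) =====
def Claim_equal_strip_legacy_tag : Prop := ∀ (raw_name : String), Dom_strip_legacy_tag raw_name → Spec_strip_legacy_tag raw_name (strip_legacy_tag raw_name)

-- ===== LEMMAS AND PROOFS =====

-- drop up to and including the first ']' (all of it if there is none)
def dropCl : List Char → List Char
  | [] => []
  | c :: r => if c = ']' then r else dropCl r

theorem dropCl_length_le (l : List Char) : (dropCl l).length ≤ l.length := by
  induction l with
  | nil => simp [dropCl]
  | cons c r ih => by_cases h : c = ']' <;> simp [dropCl, h] <;> omega

-- canonical result of the tag-stripping on a char list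
def outF : List Char → List Char
  | [] => []
  | c :: r =>
    if c = '[' then outF (dropCl r) else c :: outF r
termination_by l => l.length
decreasing_by
  · exact Nat.lt_succ_of_le (dropCl_length_le r)
  · simp

-- split on '[' (Python str.split semantics, clean recursion)
def mySplit : List Char → List (List Char)
  | [] => [[]]
  | c :: r =>
    let ps := mySplit r
    if c = '[' then [] :: ps else (c :: ps.headD []) :: ps.tail

-- what B keeps of a segment that followed a '['
def tagRest (p : List Char) : List Char := if ']' ∈ p then dropCl p else []

theorem mySplit_ne_nil (l : List Char) : mySplit l ≠ [] := by
  cases l with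
  | nil => simp [mySplit]
  | cons c r => simp only [mySplit]; split <;> simp

theorem mySplit_eq_head_cons (l : List Char) :
    mySplit l = (mySplit l).headD [] :: (mySplit l).tail := by
  cases h : mySplit l with
  | nil => exact absurd h (mySplit_ne_nil l)
  | cons a t => simp

-- A's fold computes outF (state false) / outF ∘ dropCl (state true)
theorem foldA (cs : List Char) : ∀ acc : List Char,
    (cs.foldl stripLegacyStep (acc, false)).1 = acc ++ outF cs ∧
    (cs.foldl stripLegacyStep (acc, true)).1 = acc ++ outF (dropCl cs) := by
  induction cs with
  | nil => intro acc; simp [outF, dropCl]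
  | cons c r ih =>
    intro acc
    constructor
    · by_cases h1 : c = '['
      · simp [List.foldl, stripLegacyStep, h1, outF, (ih acc).2]
      · simp [List.foldl, stripLegacyStep, h1, outF, (ih (acc ++ [c])).1]
    · by_cases h2 : c = ']'
      · simp [List.foldl, stripLegacyStep, h2, dropCl, (ih acc).1]
      · by_cases h1 : c = '['
        · simp [List.foldl, stripLegacyStep, h1, h2, dropCl, (ih acc).2]
        · simp [List.foldl, stripLegacyStep, h1, h2, dropCl, (ih acc).2]

-- splitOn.go with sep "[" computes mySplit
theorem goSplit : ∀ (fuel : Nat) (l : List Char), l.length ≤ fuel → ∀ (cur : List Char) (acc : List (List Char)),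
    PySem.Chars.splitOn.go ['['] fuel l cur acc =
      acc.reverse ++ (cur.reverse ++ (mySplit l).headD []) :: (mySplit l).tail := by
  intro fuel
  induction fuel with
  | zero =>
    intro l hl cur acc
    have : l = [] := List.length_eq_zero_iff.mp (Nat.le_zero.mp hl)
    subst this
    simp [PySem.Chars.splitOn.go, mySplit]
  | succ n ih =>
    intro l hl cur acc
    cases l with
    | nil => simp [PySem.Chars.splitOn.go, mySplit]
    | cons c r =>
      by_cases h : c = '['
      · subst h
        rw [PySem.Chars.splitOn.go]
        rw [if_pos (by simp [List.isPrefixOf])]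
        rw [show List.drop (['[']).length ('[' :: r) = r from rfl]
        rw [ih r (by simpa using Nat.le_of_succ_le_succ hl) [] (cur.reverse :: acc)]
        simp only [mySplit, if_pos rfl]
        simp
        rw [← List.headD_eq_head?_getD]
        exact (mySplit_eq_head_cons r).symm
      · rw [PySem.Chars.splitOn.go]
        rw [if_neg (by simp [List.isPrefixOf]; exact fun e => h e.symm)]
        rw [ih r (by simpa using Nat.le_of_succ_le_succ hl) (c :: cur) acc]
        simp [mySplit, h]

-- splitOnMax.go with maxsplit exhausted returns the rest as one piece
theorem goMax0 (fuel : Nat) (l cur : List Char) (acc : List (List Char)) :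
    PySem.Chars.splitOnMax.go [']'] fuel 0 l cur acc = acc.reverse ++ [cur.reverse ++ l] := by
  cases fuel with
  | zero => simp [PySem.Chars.splitOnMax.go]
  | succ n => cases l <;> simp [PySem.Chars.splitOnMax.go]

-- splitOnMax.go with sep "]" and maxsplit 1
theorem goMax1 : ∀ (fuel : Nat) (l : List Char), l.length ≤ fuel → ∀ (cur : List Char) (acc : List (List Char)),
    PySem.Chars.splitOnMax.go [']'] fuel 1 l cur acc =
      acc.reverse ++ (if ']' ∈ l then [cur.reverse ++ l.takeWhile (· ≠ ']'), dropCl l]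
                      else [cur.reverse ++ l]) := by
  intro fuel
  induction fuel with
  | zero =>
    intro l hl cur acc
    have : l = [] := List.length_eq_zero_iff.mp (Nat.le_zero.mp hl)
    subst this
    simp [PySem.Chars.splitOnMax.go]
  | succ n ih =>
    intro l hl cur acc
    cases l with
    | nil => simp [PySem.Chars.splitOnMax.go]
    | cons c r =>
      by_cases h : c = ']'
      · subst h
        rw [PySem.Chars.splitOnMax.go]
        rw [if_neg (by omega : ¬ (1 : Nat) = 0)]
        rw [if_pos (by simp [List.isPrefixOf])]
        rw [goMax0]
        simp [dropCl, List.takeWhile]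
      · rw [PySem.Chars.splitOnMax.go]
        rw [if_neg (by omega : ¬ (1 : Nat) = 0),
            if_neg (by simp [List.isPrefixOf]; exact fun e => h e.symm)]
        rw [ih r (by simpa using Nat.le_of_succ_le_succ hl) (c :: cur) acc]
        by_cases hm : ']' ∈ r <;> simp [hm, h, dropCl, List.takeWhile, Ne.symm h]

-- the core list-level equivalence
theorem coreL (cs : List Char) :
    outF cs = (mySplit cs).headD [] ++ (((mySplit cs).tail).map tagRest).flatten ∧
    outF (dropCl cs) = ((mySplit cs).map tagRest).flatten := by
  induction cs with
  | nil => simp [outF, dropCl, mySplit, tagRest]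
  | cons c r ih =>
    by_cases h1 : c = '['
    · subst h1
      constructor
      · rw [outF]; simp only [if_pos rfl, mySplit]
        simpa using ih.2
      · show outF (dropCl ('[' :: r)) = _
        rw [dropCl, if_neg (by decide)]
        simp only [mySplit, if_true]
        simpa [tagRest] using ih.2
    · by_cases h2 : c = ']'
      · subst h2
        constructor
        · rw [outF, if_neg (by decide)]
          simp only [mySplit, if_neg (by decide : ¬ (']' = '['))]
          rw [ih.1]
          simp
        · show outF (dropCl (']' :: r)) = _
          rw [dropCl, if_pos rfl]
          simp only [mySplit, if_neg (by decide : ¬ (']' = '['))]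
          rw [List.map_cons, List.flatten_cons]
          have ht : tagRest (']' :: (mySplit r).headD []) = (mySplit r).headD [] := by
            simp [tagRest, dropCl]
          rw [ht, ih.1]
      · constructor
        · rw [outF, if_neg h1]
          simp only [mySplit, if_neg h1]
          rw [ih.1]
          simp
        · show outF (dropCl (c :: r)) = _
          rw [dropCl, if_neg h2]
          simp only [mySplit, if_neg h1]
          rw [List.map_cons, List.flatten_cons]
          have ht : tagRest (c :: (mySplit r).headD []) = tagRest ((mySplit r).headD []) := by
            simp [tagRest, dropCl, h2, Ne.symm h2]
          rw [ht]
          have := ih.2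
          rw [mySplit_eq_head_cons r, List.map_cons, List.flatten_cons] at this
          exact this

theorem join_nil_flatten (ps : List (List Char)) : PySem.Chars.join [] ps = ps.flatten := by
  induction ps with
  | nil => simp [PySem.Chars.join, List.intercalate]
  | cons p t ih =>
    cases t with
    | nil => simp [PySem.Chars.join, List.intercalate]
    | cons q u =>
      simp only [PySem.Chars.join, List.intercalate] at *
      simp [List.intersperse] at *
      simpa using ih

theorem splitOn_eq_mySplit (cs : List Char) :
    PySem.Chars.splitOn cs ['['] = mySplit cs := by
  rw [PySem.Chars.splitOn, goSplit (cs.length + 1) cs (by omega) [] []]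
  simpa using (mySplit_eq_head_cons cs).symm

theorem mem_iff_singleton_infix (a : Char) (l : List Char) : [a] <:+: l ↔ a ∈ l := by
  constructor
  · intro h; exact List.singleton_sublist.mp h.sublist
  · intro h
    obtain ⟨s, t, rfl⟩ := List.append_of_mem h
    exact ⟨s, t, by simp⟩

-- B's per-segment computation equals tagRest, at the String level
theorem pieceB (q : List Char) :
    (if PySem.Str.isIn "]" (String.ofList q)
     then ((PySem.Str.splitMax? (String.ofList q) "]" 1).getD []).getD 1 ""
     else "") = String.ofList (tagRest q) := by
  have hin : PySem.Str.isIn "]" (String.ofList q) = PySem.Chars.isIn [']'] q := by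
    rw [PySem.Str.isIn_eq]; simp [String.toList_ofList]
  by_cases h : ']' ∈ q
  · have : PySem.Chars.isIn [']'] q = true :=
      (PySem.Chars.isIn_iff_infix _ _).mpr ((mem_iff_singleton_infix _ _).mpr h)
    rw [hin, if_pos this]
    rw [PySem.Str.splitMax?]
    simp only [String.toList_ofList]
    rw [show ("]" : String).toList = [']'] from by decide]
    rw [PySem.Chars.splitMax?, if_neg (by simp)]
    rw [PySem.Chars.splitOnMax, if_neg (by omega)]
    have h1 : (1 : Int).toNat = 1 := rfl
    rw [h1, goMax1 (q.length + 1) q (by omega) [] []]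
    simp [h, tagRest]
  · have : PySem.Chars.isIn [']'] q = false := by
      rw [← Bool.not_eq_true, (PySem.Chars.isIn_iff_infix _ _)]
      rw [mem_iff_singleton_infix]; exact h
    rw [hin, this]
    simp [tagRest, h]

-- ===== VERDICT (by name: the statement is the Claim_ definition above) =====
theorem strip_legacy_tag_spec : Claim_equal_strip_legacy_tag := by
  intro raw _
  unfold Spec_strip_legacy_tag
  simp only [strip_legacy_tag, strip_legacy_tag_alt]
  set cs := PySem.Chars.strip raw.toList with hcs
  have hstrip : PySem.Str.strip raw = String.ofList cs := by
    rw [PySem.Str.strip, hcs]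
  rw [hstrip]
  have hA : ((String.ofList cs).toList.foldl stripLegacyStep ([], false)).1 = outF cs := by
    rw [String.toList_ofList]
    simpa using (foldA cs []).1
  rw [hA]
  have hsplit : PySem.Str.split? (String.ofList cs) "[" = some ((mySplit cs).map String.ofList) := by
    rw [PySem.Str.split?, PySem.Chars.split?]
    simp [String.toList_ofList, splitOn_eq_mySplit]
  rw [hsplit]
  simp only [Option.getD_some]
  have hhead : ((mySplit cs).map String.ofList).headD "" = String.ofList ((mySplit cs).headD []) := by
    rw [mySplit_eq_head_cons cs]; simp
  have htail : ((mySplit cs).map String.ofList).tail = (mySplit cs).tail.map String.ofList := by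
    rw [mySplit_eq_head_cons cs]; simp
  rw [hhead, htail, List.map_map]
  have hmapped :
      (mySplit cs).tail.map ((fun p => if PySem.Str.isIn "]" p then ((PySem.Str.splitMax? p "]" 1).getD []).getD 1 "" else "") ∘ String.ofList)
        = (mySplit cs).tail.map (String.ofList ∘ tagRest) := by
    apply List.map_congr_left
    intro q _
    simpa using pieceB q
  rw [hmapped]
  apply congrArg PySem.Str.strip
  -- both joins: reduce to char-list flatten equality
  rw [PySem.Str.join, PySem.Str.join]
  apply congrArg String.ofList
  rw [show ("" : String).toList = [] from by decide]
  have hL : List.map String.toList (List.map (fun c => String.ofList [c]) (outF cs))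
      = (outF cs).map (fun c => [c]) := by
    rw [List.map_map]
    apply List.map_congr_left
    intro c _
    simp [String.toList_ofList]
  rw [hL, PySem.Chars.join_nil_singletons]
  have hR : List.map String.toList
        (String.ofList ((mySplit cs).headD []) :: List.map (String.ofList ∘ tagRest) (mySplit cs).tail)
      = (mySplit cs).headD [] :: (mySplit cs).tail.map tagRest := by
    simp [List.map_map, Function.comp_def, String.toList_ofList]
  rw [hR, join_nil_flatten]
  simpa using (coreL cs).1
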